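-- pv_equiv track=rewrite | github.com/Domphe/Q-SMEC-Quantum-Tools | knowledge-db/chemistry/databases/qcbd/scripts/extract_entities_from_report.py | gather_refs
-- ===== SOURCE A (Python) =====
-- def gather_refs(lines):
--     refs = []
--     for i, line in enumerate(lines):
--         if line.startswith("- ") and ":\\" in line:
--             path = line[2:].strip()
--             sample = None
--             # Look ahead for sample line
--             if i + 1 < len(lines) and lines[i + 1].strip().startswith("- Sample:"):
--                 sample = lines[i + 1].strip().replace("- Sample:", "").strip()
--             refs.append({"path": path, "sample": sample})
--     return refs
-- ===== SOURCE B (Python) =====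
-- def gather_refs(lines):
--     refs = []
--     prev_was_path = False
--     for line in lines:
--         stripped = line.strip()
--         if prev_was_path and stripped.startswith("- Sample:"):
--             refs[-1]["sample"] = stripped.replace("- Sample:", "").strip()
--         if line.startswith("- ") and ":\\" in line:
--             refs.append({"path": line[2:].strip(), "sample": None})
--             prev_was_path = True
--         else:
--             prev_was_path = False
--     return refs
-- ===== Notes on version B (the rewrite author's own statement) =====
-- stated objective: alternative
-- what changed: A peeks ahead at the next line from an enumerate loop to attach each ref's sample value at emit time; B is a single forward pass with a prev-was-path flag that emits refs with an empty sample field and back-fills the last emitted ref when the following line turns out to be a sample line, removing all index arithmetic and lookahead.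
import Mathlib
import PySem

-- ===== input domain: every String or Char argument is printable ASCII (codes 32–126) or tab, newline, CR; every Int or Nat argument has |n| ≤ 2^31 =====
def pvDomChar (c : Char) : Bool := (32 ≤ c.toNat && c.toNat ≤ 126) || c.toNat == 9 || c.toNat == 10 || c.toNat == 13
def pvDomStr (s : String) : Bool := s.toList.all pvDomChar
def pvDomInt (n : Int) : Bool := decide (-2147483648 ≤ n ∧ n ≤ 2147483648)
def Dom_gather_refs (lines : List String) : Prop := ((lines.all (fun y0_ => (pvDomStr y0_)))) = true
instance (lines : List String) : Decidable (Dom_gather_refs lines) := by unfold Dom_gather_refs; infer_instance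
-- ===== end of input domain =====

-- B replaces A's index-based lookahead (enumerate + lines[i+1]) by a single forward pass with a
-- previous-line flag that back-fills the sample of the last emitted ref; same values (alternative decomposition).


-- ===== PORT A =====
-- loop body of A: refs is the accumulator, p = (i, line) coming from enumerate(lines)
def gatherStepA (lines : List String) (refs : List (List (String × Option String))) (p : Int × String) : List (List (String × Option String)) :=
  let i := p.1
  let line := p.2
  if PySem.Str.startswith line "- " && PySem.Str.isIn ":\\" line then
    let path := PySem.Str.strip (PySem.Str.slice line (some 2) none)
    let sample : Option String :=
      if i + 1 < (lines.length : Int) then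
        match PySem.List.pyGet? lines (i + 1) with
        | some nxt =>
          if PySem.Str.startswith (PySem.Str.strip nxt) "- Sample:" then
            some (PySem.Str.strip (PySem.Str.replace (PySem.Str.strip nxt) "- Sample:" ""))
          else none
        | none => none
      else none
    refs ++ [[("path", some path), ("sample", sample)]]
  else refs

def gather_refs (lines : List String) : List (List (String × Option String)) :=
  (PySem.List.enumerate lines 0).foldl (gatherStepA lines) []

-- ===== PORT B =====
-- hand port of `r["sample"] = v` for an assoc list that already carries key "sample":
-- overwrite the value in place (exact here: every ref B builds has keys "path","sample")
def setSample (r : List (String × Option String)) (v : String) : List (String × Option String) :=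
  r.map (fun pr => if pr.1 = "sample" then (pr.1, some v) else pr)

-- hand port of `refs[-1]["sample"] = v`: update the last element ([] case unreachable, totality guard only)
def setLastSample : List (List (String × Option String)) → String → List (List (String × Option String))
  | [], _ => []
  | [r], v => [setSample r v]
  | r :: s :: rest, v => r :: setLastSample (s :: rest) v

-- B's loop: recursion over the lines with accumulator (refs, prev_was_path)
def gatherAltGo : List String → List (List (String × Option String)) → Bool → List (List (String × Option String))
  | [], refs, _ => refs
  | line :: rest, refs, prev =>
    let stripped := PySem.Str.strip line
    let refs1 :=
      if prev && PySem.Str.startswith stripped "- Sample:" then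
        setLastSample refs (PySem.Str.strip (PySem.Str.replace stripped "- Sample:" ""))
      else refs
    if PySem.Str.startswith line "- " && PySem.Str.isIn ":\\" line then
      gatherAltGo rest (refs1 ++ [[("path", some (PySem.Str.strip (PySem.Str.slice line (some 2) none))), ("sample", none)]]) true
    else
      gatherAltGo rest refs1 false

def gather_refs_alt (lines : List String) : List (List (String × Option String)) :=
  gatherAltGo lines [] false

-- ===== PRECONDITION & SPEC =====
def Spec_gather_refs (lines : List String) (out : List (List (String × Option String))) : Prop := out = gather_refs_alt lines
instance (lines : List String) (out : List (List (String × Option String))) : Decidable (Spec_gather_refs lines out) := by unfold Spec_gather_refs; infer_instance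

-- ===== CLAIM (what is proved, stated in full; the proofs are below) =====
def Claim_equal_gather_refs : Prop := ∀ (lines : List String), Dom_gather_refs lines → Spec_gather_refs lines (gather_refs lines)

-- ===== LEMMAS AND PROOFS =====

-- the ref A emits for a matched path line, given the (optional) sample value
def refOf (line : String) (s : Option String) : List (String × Option String) :=
  [("path", some (PySem.Str.strip (PySem.Str.slice line (some 2) none))), ("sample", s)]

-- the sample A extracts from the (optional) next line
def sampOf : Option String → Option String
  | none => none
  | some n =>
    if PySem.Str.startswith (PySem.Str.strip n) "- Sample:" then
      some (PySem.Str.strip (PySem.Str.replace (PySem.Str.strip n) "- Sample:" ""))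
    else none

-- common recursive description of A's loop (the lookahead is the head of the remaining suffix)
def specA : List String → List (List (String × Option String)) → List (List (String × Option String))
  | [], acc => acc
  | x :: rest, acc =>
      specA rest (if PySem.Str.startswith x "- " && PySem.Str.isIn ":\\" x then acc ++ [refOf x (sampOf rest.head?)] else acc)

theorem specA_cons (x : String) (rest : List String) (acc : List (List (String × Option String))) :
    specA (x :: rest) acc
      = specA rest (if PySem.Str.startswith x "- " && PySem.Str.isIn ":\\" x then acc ++ [refOf x (sampOf rest.head?)] else acc) := rfl

theorem setLastSample_append (acc : List (List (String × Option String))) (p v : String) :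
    setLastSample (acc ++ [refOf p none]) v = acc ++ [refOf p (some v)] := by
  induction acc with
  | nil => simp [setLastSample, setSample, refOf, show ("path" : String) ≠ "sample" from by decide]
  | cons a t ih =>
    cases t with
    | nil => simpa [setLastSample] using ih
    | cons b t' => simpa [setLastSample] using ih

-- ===== A side: the enumerate/lookahead fold is specA =====
theorem gatherA_aux (lines : List String) :
    ∀ (suffix : List String) (k : Nat) (acc : List (List (String × Option String))),
      lines.drop k = suffix →
      (PySem.List.enumerate suffix (k : Int)).foldl (gatherStepA lines) acc = specA suffix acc := by
  intro suffix
  induction suffix with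
  | nil => intro k acc h; simp [PySem.List.enumerate_nil, specA]
  | cons x rest ih =>
    intro k acc h
    have hk : k < lines.length := by
      by_contra hc
      simp [List.drop_eq_nil_of_le (le_of_not_gt hc)] at h
    have hlen : lines.length = k + rest.length + 1 := by
      have hdl := congrArg List.length h
      simp [List.length_drop] at hdl
      omega
    have hget : PySem.List.pyGet? lines ((k : Int) + 1) = rest.head? := by
      rw [show ((k : Int) + 1) = ((k + 1 : Nat) : Int) by push_cast; ring, PySem.List.pyGet?_natCast]
      have h2 : lines[k + 1]? = (x :: rest)[1]? := by rw [← h, List.getElem?_drop]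
      cases rest <;> simp_all
    have hstep : gatherStepA lines acc ((k : Int), x)
        = (if PySem.Str.startswith x "- " && PySem.Str.isIn ":\\" x then acc ++ [refOf x (sampOf rest.head?)] else acc) := by
      cases rest with
      | nil =>
        have hnot : ¬ ((k : Int) + 1 < (lines.length : Int)) := by
          simp only [List.length_nil] at hlen
          rw [hlen]; push_cast; omega
        simp [gatherStepA, refOf, sampOf, hnot]
      | cons r rest' =>
        have hlt : (k : Int) + 1 < (lines.length : Int) := by
          have : k + 1 < lines.length := by simp at hlen; omega
          exact_mod_cast this
        simp only [List.head?_cons] at hget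
        simp [gatherStepA, refOf, sampOf, hlt, hget]
    have hdrop : lines.drop (k + 1) = rest := by
      have hdd : lines.drop (k + 1) = (lines.drop k).drop 1 := by rw [List.drop_drop]
      rw [hdd, h]; rfl
    rw [PySem.List.enumerate_cons, List.foldl_cons, hstep,
        show ((k : Int) + 1) = ((k + 1 : Nat) : Int) by push_cast; ring,
        ih (k + 1) _ hdrop, specA_cons]

theorem gatherA_eq_specA (lines : List String) : gather_refs lines = specA lines [] := by
  simpa [gather_refs] using gatherA_aux lines lines 0 [] (by simp)

-- ===== B side: one-step unfoldings of B's loop =====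
theorem go_cons_false (x : String) (rest : List String) (acc : List (List (String × Option String))) :
    gatherAltGo (x :: rest) acc false =
      if PySem.Str.startswith x "- " && PySem.Str.isIn ":\\" x then
        gatherAltGo rest (acc ++ [refOf x none]) true
      else gatherAltGo rest acc false := by
  show (if PySem.Str.startswith x "- " && PySem.Str.isIn ":\\" x then
      gatherAltGo rest ((if false && PySem.Str.startswith (PySem.Str.strip x) "- Sample:" then
          setLastSample acc (PySem.Str.strip (PySem.Str.replace (PySem.Str.strip x) "- Sample:" ""))
        else acc) ++ [[("path", some (PySem.Str.strip (PySem.Str.slice x (some 2) none))), ("sample", none)]]) true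
    else gatherAltGo rest (if false && PySem.Str.startswith (PySem.Str.strip x) "- Sample:" then
          setLastSample acc (PySem.Str.strip (PySem.Str.replace (PySem.Str.strip x) "- Sample:" ""))
        else acc) false) = _
  rw [Bool.false_and]
  rfl

theorem go_cons_true (x : String) (rest : List String) (acc : List (List (String × Option String))) (p : String) :
    gatherAltGo (x :: rest) (acc ++ [refOf p none]) true =
      if PySem.Str.startswith x "- " && PySem.Str.isIn ":\\" x then
        gatherAltGo rest ((acc ++ [refOf p (sampOf (some x))]) ++ [refOf x none]) true
      else gatherAltGo rest (acc ++ [refOf p (sampOf (some x))]) false := by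
  have hsamp : (if true && PySem.Str.startswith (PySem.Str.strip x) "- Sample:" then
        setLastSample (acc ++ [refOf p none]) (PySem.Str.strip (PySem.Str.replace (PySem.Str.strip x) "- Sample:" ""))
      else acc ++ [refOf p none]) = acc ++ [refOf p (sampOf (some x))] := by
    rw [Bool.true_and]
    by_cases hs : PySem.Str.startswith (PySem.Str.strip x) "- Sample:" = true
    · rw [if_pos hs, setLastSample_append, sampOf, if_pos hs]
    · rw [if_neg hs, sampOf, if_neg hs]
  show (if PySem.Str.startswith x "- " && PySem.Str.isIn ":\\" x then
      gatherAltGo rest ((if true && PySem.Str.startswith (PySem.Str.strip x) "- Sample:" then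
          setLastSample (acc ++ [refOf p none]) (PySem.Str.strip (PySem.Str.replace (PySem.Str.strip x) "- Sample:" ""))
        else acc ++ [refOf p none]) ++ [[("path", some (PySem.Str.strip (PySem.Str.slice x (some 2) none))), ("sample", none)]]) true
    else gatherAltGo rest (if true && PySem.Str.startswith (PySem.Str.strip x) "- Sample:" then
          setLastSample (acc ++ [refOf p none]) (PySem.Str.strip (PySem.Str.replace (PySem.Str.strip x) "- Sample:" ""))
        else acc ++ [refOf p none]) false) = _
  rw [hsamp]
  rfl

-- joint invariant: with flag false B's loop computes specA; with flag true over a refs list ending in a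
-- fresh (sample = none) ref for path line p, it computes specA with that ref's sample back-filled from the head
theorem gatherB_aux :
    ∀ (suffix : List String),
      (∀ acc, gatherAltGo suffix acc false = specA suffix acc) ∧
      (∀ acc p, gatherAltGo suffix (acc ++ [refOf p none]) true = specA suffix (acc ++ [refOf p (sampOf suffix.head?)])) := by
  intro suffix
  induction suffix with
  | nil => exact ⟨fun acc => rfl, fun acc p => by simp [gatherAltGo, specA, sampOf]⟩
  | cons x rest ih =>
    refine ⟨fun acc => ?_, fun acc p => ?_⟩
    · rw [go_cons_false, specA_cons]
      by_cases hx : (PySem.Str.startswith x "- " && PySem.Str.isIn ":\\" x) = true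
      · rw [if_pos hx, if_pos hx, ih.2 acc x]
      · rw [if_neg hx, if_neg hx, ih.1 acc]
    · rw [go_cons_true, List.head?_cons, specA_cons]
      by_cases hx : (PySem.Str.startswith x "- " && PySem.Str.isIn ":\\" x) = true
      · rw [if_pos hx, if_pos hx, ih.2 (acc ++ [refOf p (sampOf (some x))]) x]
      · rw [if_neg hx, if_neg hx, ih.1 (acc ++ [refOf p (sampOf (some x))])]

-- ===== VERDICT (by name: the statement is the Claim_ definition above) =====
theorem gather_refs_spec : Claim_equal_gather_refs := by
  intro lines _
  unfold Spec_gather_refs gather_refs_alt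
  rw [gatherA_eq_specA, (gatherB_aux lines).1 []]
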